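-- pv_equiv track=rewrite | github.com/espnet/espnet | egs2/librispeech_100/asr1/local/create_extra_info.py | text2char
-- ===== SOURCE A (Python) =====
-- from typing import List
--
-- def text2char(text: List[str]) -> List[str]:
--     text = " ".join(text)
--
--     chars = []
--     for char in text:
--         if char == " ":
--             chars.append("<space>")
--         else:
--             chars.append(char)
--
--     return chars
-- ===== SOURCE B (Python) =====
-- from typing import List
--
-- def text2char(text: List[str]) -> List[str]:
--     # Split the joined text on spaces, then flatten the space-free segments,
--     # inserting one "<space>" token between consecutive segments: no per-char
--     # space test is performed.
--     segments = " ".join(text).split(" ")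
--     chars = list(segments[0])
--     for seg in segments[1:]:
--         chars.append("<space>")
--         chars.extend(seg)
--     return chars
-- ===== Notes on version B (the rewrite author's own statement) =====
-- stated objective: alternative
-- what changed: B splits the joined text on ' ' into space-free segments and flattens their characters with one '<space>' token inserted between consecutive segments, eliminating A's per-character space test.
import Mathlib
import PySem

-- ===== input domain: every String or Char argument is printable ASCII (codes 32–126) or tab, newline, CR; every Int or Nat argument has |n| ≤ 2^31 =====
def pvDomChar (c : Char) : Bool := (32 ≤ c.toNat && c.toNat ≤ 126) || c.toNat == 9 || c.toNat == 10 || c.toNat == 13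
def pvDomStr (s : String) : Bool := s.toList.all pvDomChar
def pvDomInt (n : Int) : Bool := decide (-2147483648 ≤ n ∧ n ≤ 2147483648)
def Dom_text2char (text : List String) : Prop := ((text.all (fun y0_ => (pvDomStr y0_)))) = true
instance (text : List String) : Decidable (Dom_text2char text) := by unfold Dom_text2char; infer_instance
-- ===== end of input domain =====

-- B splits the joined text on ' ' into space-free segments and flattens their characters with
-- one '<space>' token between segments, eliminating A's per-character space test
-- (objective: alternative; same cost).

-- ===== PORT A =====
-- A: join with spaces, then scan the characters, mapping ' ' to "<space>".
def text2char (text : List String) : List String :=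
  (PySem.Str.join " " text).toList.foldl
    (fun chars c => chars ++ [if c = ' ' then "<space>" else String.ofList [c]]) []

-- ===== PORT B =====
-- B: segments = joined.split(" "); first segment's chars, then for each later
-- segment append "<space>" and its chars.
def text2char_alt (text : List String) : List String :=
  match PySem.Chars.splitOn (PySem.Str.join " " text).toList [' '] with
  | [] => []   -- str.split never returns an empty list; unreachable
  | s0 :: rest =>
    rest.foldl (fun chars seg => (chars ++ ["<space>"]) ++ seg.map (fun c => String.ofList [c]))
      (s0.map (fun c => String.ofList [c]))

-- ===== PRECONDITION & SPEC =====
def Spec_text2char (text : List String) (out : List String) : Prop := out = text2char_alt text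
instance (text : List String) (out : List String) : Decidable (Spec_text2char text out) := by unfold Spec_text2char; infer_instance

-- ===== CLAIM (what is proved, stated in full; the proofs are below) =====
def Claim_equal_text2char : Prop := ∀ (text : List String), Dom_text2char text → Spec_text2char text (text2char text)

-- ===== LEMMAS AND PROOFS =====

-- the single-char mapping both programs emit
def pvTok (c : Char) : String := if c = ' ' then "<space>" else String.ofList [c]

-- reference space-splitter (single-char separator ' ')
def pvSplitSp : List Char → List (List Char)
  | [] => [[]]
  | c :: r => if c = ' ' then [] :: pvSplitSp r else
      match pvSplitSp r with
      | [] => [[c]]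
      | x :: xs => (c :: x) :: xs

-- prepend onto the head segment
def pvConsH (p : List Char) : List (List Char) → List (List Char)
  | [] => [p]
  | x :: xs => (p ++ x) :: xs

theorem pvSplitSp_ne_nil (l : List Char) : pvSplitSp l ≠ [] := by
  cases l with
  | nil => simp [pvSplitSp]
  | cons c r =>
    simp only [pvSplitSp]
    split
    · simp
    · cases h : pvSplitSp r <;> simp

theorem pv_splitOn_go (l : List Char) : ∀ (fuel : Nat) (cur : List Char) (acc : List (List Char)),
    l.length ≤ fuel →
    PySem.Chars.splitOn.go [' '] fuel l cur acc
      = acc.reverse ++ pvConsH cur.reverse (pvSplitSp l) := by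
  induction l with
  | nil =>
    intro fuel cur acc _
    cases fuel <;> simp [PySem.Chars.splitOn.go, pvSplitSp, pvConsH]
  | cons c r ih =>
    intro fuel cur acc h
    cases fuel with
    | zero => simp at h
    | succ fuel =>
      simp only [PySem.Chars.splitOn.go]
      by_cases hc : c = ' '
      · subst hc
        have hp : List.isPrefixOf [' '] (' ' :: r) = true := by simp [List.isPrefixOf]
        rw [if_pos hp]
        simp only [List.length, List.drop]
        rw [ih fuel [] (cur.reverse :: acc) (by simpa using Nat.le_of_succ_le_succ h)]
        have hne := pvSplitSp_ne_nil r
        cases hs : pvSplitSp r with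
        | nil => exact absurd hs hne
        | cons x xs => simp [pvSplitSp, pvConsH, hs]
      · have hp : List.isPrefixOf [' '] (c :: r) = false := by
          simp [List.isPrefixOf]
          exact fun h => hc h.symm
        rw [if_neg (by simp [hp])]
        rw [ih fuel (c :: cur) acc (by simpa using Nat.le_of_succ_le_succ h)]
        have hne := pvSplitSp_ne_nil r
        cases hs : pvSplitSp r with
        | nil => exact absurd hs hne
        | cons x xs => simp [pvSplitSp, pvConsH, hs, hc]

theorem pv_splitOn_eq (cs : List Char) :
    PySem.Chars.splitOn cs [' '] = pvSplitSp cs := by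
  unfold PySem.Chars.splitOn
  rw [pv_splitOn_go cs (cs.length + 1) [] [] (Nat.le_succ _)]
  have hne := pvSplitSp_ne_nil cs
  cases hs : pvSplitSp cs with
  | nil => exact absurd hs hne
  | cons x xs => simp [pvConsH]

-- B's foldl over the later segments, unrolled
theorem pv_alt_foldl (rest : List (List Char)) : ∀ (i : List String),
    rest.foldl (fun chars seg => (chars ++ ["<space>"]) ++ seg.map (fun c => String.ofList [c])) i
      = i ++ rest.flatMap (fun seg => "<space>" :: seg.map (fun c => String.ofList [c])) := by
  induction rest with
  | nil => simp
  | cons s t ih => intro i; simp [ih, List.flatMap]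

-- the segment decomposition reproduces A's char map
theorem pv_main (cs : List Char) :
    (match pvSplitSp cs with
     | [] => []
     | s0 :: rest => s0.map (fun c => String.ofList [c])
         ++ rest.flatMap (fun seg => "<space>" :: seg.map (fun c => String.ofList [c])))
      = cs.map pvTok := by
  induction cs with
  | nil => simp [pvSplitSp]
  | cons c r ih =>
    have hne := pvSplitSp_ne_nil r
    by_cases hc : c = ' '
    · subst hc
      cases hs : pvSplitSp r with
      | nil => exact absurd hs hne
      | cons x xs =>
        rw [hs] at ih
        simp only [pvSplitSp, if_pos rfl, hs]
        simp only [List.map_cons, pvTok, if_pos rfl]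
        simpa using ih
    · cases hs : pvSplitSp r with
      | nil => exact absurd hs hne
      | cons x xs =>
        rw [hs] at ih
        simp only [pvSplitSp, hc, if_false, hs, if_neg hc]
        simp only [List.map_cons, pvTok, if_neg hc]
        simpa using ih

-- A's foldl is the char map
theorem pv_a_foldl (cs : List Char) : ∀ (acc : List String),
    cs.foldl (fun chars c => chars ++ [if c = ' ' then "<space>" else String.ofList [c]]) acc
      = acc ++ cs.map pvTok := by
  induction cs with
  | nil => simp
  | cons c r ih => intro acc; simp [ih, pvTok]

-- ===== VERDICT (by name: the statement is the Claim_ definition above) =====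
theorem text2char_spec : Claim_equal_text2char := by
  intro text _
  unfold Spec_text2char text2char text2char_alt
  rw [pv_splitOn_eq, pv_a_foldl]
  have hne := pvSplitSp_ne_nil (PySem.Str.join " " text).toList
  cases hs : pvSplitSp (PySem.Str.join " " text).toList with
  | nil => exact absurd hs hne
  | cons s0 rest =>
    dsimp only
    rw [pv_alt_foldl]
    have := pv_main (PySem.Str.join " " text).toList
    rw [hs] at this
    simpa using this.symm
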